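-- pv_equiv track=rewrite | github.com/wargin-E/git-one | balanced_world.py | termedium
-- ===== SOURCE A (Python) =====
-- def termedium(a):
--     l=len(a)
--     before=len(a)
--     for k in range(0,l-1):
--         if a[k]=="{" and a[k+1]=="}":
--             a[k+1]=0
--             a[k]=0
--             break
--     while 0 in a:
--         a.remove(0)
--     after=len(a)
--     if before==after:
--         return 0
--     else:
--         return 1
-- ===== SOURCE B (Python) =====
-- def termedium(a):
--     # One forward pass: build the output list, skipping the first adjacent "{", "}" pair.
--     # Mutates a in place like the original (a[:] = out); returns 1 iff a pair was removed.
--     out = []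
--     found = False
--     i = 0
--     n = len(a)
--     while i < n:
--         if not found and a[i] == "{" and i + 1 < n and a[i + 1] == "}":
--             found = True
--             i += 2
--         else:
--             out.append(a[i])
--             i += 1
--     a[:] = out
--     return 1 if found else 0
-- ===== Notes on version B (the rewrite author's own statement) =====
-- stated objective: simpler
-- what changed: Replaces A's three phases (index scan that overwrites the pair with 0 sentinels, a 'while 0 in a: a.remove(0)' cleanup, and a length comparison) by a single forward pass that builds the result list and returns the found-flag directly.
import Mathlib
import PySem

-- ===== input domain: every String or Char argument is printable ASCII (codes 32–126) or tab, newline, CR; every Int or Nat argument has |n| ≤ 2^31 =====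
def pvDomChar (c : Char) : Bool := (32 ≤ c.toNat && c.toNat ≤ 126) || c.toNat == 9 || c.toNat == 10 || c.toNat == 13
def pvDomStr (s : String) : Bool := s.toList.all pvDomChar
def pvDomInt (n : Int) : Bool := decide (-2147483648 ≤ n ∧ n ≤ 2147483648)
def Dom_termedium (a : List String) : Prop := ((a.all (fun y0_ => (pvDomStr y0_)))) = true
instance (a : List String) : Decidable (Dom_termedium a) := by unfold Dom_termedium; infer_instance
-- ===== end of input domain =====

-- B does one pass instead of A's mark-with-0 / remove-all-0 / compare-lengths; both mutate the
-- argument list identically in Python, the equivalence proved here is about the RETURN value.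

-- ===== PORT A =====
-- A stores the int 0 into the list; since 0 equals no string, it is modeled exactly by
-- `none` in `List (Option String)` (a's strings become `some s`).
-- the `for k in range(0, l-1)` loop with its `break`
def termediumLoop (a : List (Option String)) : List Int → List (Option String)
  | [] => a
  | k :: ks =>
    if PySem.List.pyGetD a k none = some "{" ∧ PySem.List.pyGetD a (k + 1) none = some "}" then
      -- a[k+1]=0; a[k]=0; break   (k and k+1 are valid indices whenever the test holds)
      PySem.List.pySetD (PySem.List.pySetD a (k + 1) none) k none
    else
      termediumLoop a ks

-- helper for termination of the while-loop below
theorem termediumRemove_length_lt (xs : List (Option String)) (h : (none : Option String) ∈ xs) :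
    ((PySem.List.remove? xs (none : Option String)).getD xs).length < xs.length := by
  rw [PySem.List.remove?_eq_some_erase _ _ h]
  have := List.length_pos_of_mem h
  simp only [Option.getD]
  rw [List.length_erase_of_mem h]
  omega

-- the `while 0 in a: a.remove(0)` loop
def termediumRemZeros (xs : List (Option String)) : List (Option String) :=
  if _h : (none : Option String) ∈ xs then
    termediumRemZeros ((PySem.List.remove? xs (none : Option String)).getD xs)
  else xs
termination_by xs.length
decreasing_by exact termediumRemove_length_lt xs _h

def termedium (a : List String) : Int :=
  let a0 : List (Option String) := a.map some
  let l : Int := a0.length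
  let before : Int := a0.length
  let a1 := termediumLoop a0 (PySem.List.pyRange 0 (l - 1) 1)
  let a2 := termediumRemZeros a1
  let after : Int := a2.length
  if before = after then 0 else 1

-- ===== PORT B =====
-- the `while i < n` loop of Source B, state (out, found, i); `i+1 < n and a[i+1]=="}"` is
-- exactly `a[i+1]? = some "}"`.
def termediumAltGo (a : List String) (out : List String) (found : Bool) (i : Nat) :
    Bool × List String :=
  if h : i < a.length then
    if found = false ∧ a[i] = "{" ∧ a[i + 1]? = some "}" then
      termediumAltGo a out true (i + 2)
    else
      termediumAltGo a (out ++ [a[i]]) found (i + 1)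
  else (found, out)
termination_by a.length - i

def termedium_alt (a : List String) : Int :=
  let r := termediumAltGo a [] false 0
  if r.1 then 1 else 0

-- ===== PRECONDITION & SPEC =====
def Spec_termedium (a : List String) (out : Int) : Prop := out = termedium_alt a
instance (a : List String) (out : Int) : Decidable (Spec_termedium a out) := by unfold Spec_termedium; infer_instance

-- ===== CLAIM (what is proved, stated in full; the proofs are below) =====
def Claim_equal_termedium : Prop := ∀ (a : List String), Dom_termedium a → Spec_termedium a (termedium a)

-- ===== LEMMAS AND PROOFS =====

-- the common characterisation: an adjacent "{", "}" pair exists at or after index i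
def HasPairFrom (a : List String) (i : Nat) : Prop :=
  ∃ j : Nat, i ≤ j ∧ a[j]? = some "{" ∧ a[j + 1]? = some "}"

-- B side --------------------------------------------------------------------

theorem termediumAltGo_fst_true (a : List String) (out : List String) (i : Nat) :
    (termediumAltGo a out true i).1 = true := by
  rw [termediumAltGo]
  split
  · split
    · exact termediumAltGo_fst_true a out (i + 2)
    · exact termediumAltGo_fst_true a _ (i + 1)
  · rfl
termination_by a.length - i

theorem termediumAltGo_fst_false (a : List String) (out : List String) (i : Nat) :
    (termediumAltGo a out false i).1 = true ↔ HasPairFrom a i := by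
  rw [termediumAltGo]
  split
  · rename_i h
    split
    · rename_i hc
      simp only [termediumAltGo_fst_true, true_iff]
      exact ⟨i, le_refl i, by simp [hc.2.1, h], hc.2.2⟩
    · rename_i hc
      rw [termediumAltGo_fst_false a _ (i + 1)]
      constructor
      · rintro ⟨j, hj, h1, h2⟩; exact ⟨j, by omega, h1, h2⟩
      · rintro ⟨j, hj, h1, h2⟩
        refine ⟨j, ?_, h1, h2⟩
        rcases Nat.eq_or_lt_of_le hj with rfl | hlt
        · exact absurd ⟨rfl, by simpa [List.getElem?_eq_getElem h] using h1, h2⟩ hc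
        · omega
  · rename_i h
    simp only [Bool.false_eq_true, false_iff]
    rintro ⟨j, hj, h1, h2⟩
    have := (List.getElem?_eq_some_iff.mp h1).1
    omega
termination_by a.length - i

theorem termedium_alt_eq (a : List String) :
    termedium_alt a = if (termediumAltGo a [] false 0).1 then 1 else 0 := rfl

-- A side --------------------------------------------------------------------

theorem termediumLoop_eq_of_none (a0 : List (Option String)) (ks : List Int)
    (h : ∀ k ∈ ks, ¬ (PySem.List.pyGetD a0 k none = some "{" ∧
          PySem.List.pyGetD a0 (k + 1) none = some "}")) :
    termediumLoop a0 ks = a0 := by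
  induction ks with
  | nil => rfl
  | cons k ks ih =>
    rw [termediumLoop]
    rw [if_neg (h k (List.mem_cons_self))]
    exact ih (fun x hx => h x (List.mem_cons_of_mem _ hx))

theorem termediumLoop_length (a0 : List (Option String)) (ks : List Int) :
    (termediumLoop a0 ks).length = a0.length := by
  induction ks with
  | nil => rfl
  | cons k ks ih =>
    rw [termediumLoop]
    split
    · simp [PySem.List.length_pySetD]
    · exact ih

-- a valid pyGetD hit pins down a valid non-negative index
theorem pyGetD_some_index (a0 : List (Option String)) (k : Int) (s : String)
    (hk : 0 ≤ k) (h : PySem.List.pyGetD a0 k none = some s) :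
    k.toNat < a0.length ∧ a0[k.toNat]? = some (some s) := by
  have hk' : k = ((k.toNat : Nat) : Int) := by omega
  rw [hk', PySem.List.pyGetD_natCast] at h
  by_cases hlt : k.toNat < a0.length
  · refine ⟨hlt, ?_⟩
    rw [List.getElem?_eq_getElem hlt]
    simpa [List.getD, List.getElem?_eq_getElem hlt] using h
  · rw [List.getD_eq_getElem?_getD, List.getElem?_eq_none (by omega)] at h
    simp at h

theorem none_mem_termediumLoop (a0 : List (Option String)) (ks : List Int)
    (hpos : ∀ k ∈ ks, 0 ≤ k)
    (h : ∃ k ∈ ks, PySem.List.pyGetD a0 k none = some "{" ∧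
          PySem.List.pyGetD a0 (k + 1) none = some "}") :
    (none : Option String) ∈ termediumLoop a0 ks := by
  induction ks with
  | nil => simp at h
  | cons k ks ih =>
    rw [termediumLoop]
    split
    · rename_i hc
      have hk0 : 0 ≤ k := hpos k List.mem_cons_self
      obtain ⟨hlt, -⟩ := pyGetD_some_index a0 k "{" hk0 hc.1
      have hset : (PySem.List.pySetD (PySem.List.pySetD a0 (k + 1) none) k none) =
          ((PySem.List.pySetD a0 (k + 1) none).set k.toNat none) := by
        have hk' : k = ((k.toNat : Nat) : Int) := by omega
        rw [hk', PySem.List.pySetD_natCast]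
        congr 1
      rw [hset]
      have hmlt' : k.toNat < ((PySem.List.pySetD a0 (k + 1) none)).length := by
        rw [PySem.List.length_pySetD]; exact hlt
      have hg := List.getElem_set_self (l := PySem.List.pySetD a0 (k + 1) none)
        (i := k.toNat) (a := (none : Option String)) (by simpa using hmlt')
      exact List.mem_iff_getElem.mpr ⟨k.toNat, by simpa using hmlt', hg⟩
    · rename_i hc
      obtain ⟨k', hk', hc1, hc2⟩ := h
      rcases List.mem_cons.mp hk' with rfl | htail
      · exact absurd ⟨hc1, hc2⟩ hc
      · exact ih (fun x hx => hpos x (List.mem_cons_of_mem _ hx)) ⟨k', htail, hc1, hc2⟩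

theorem filter_isSome_erase_none (xs : List (Option String)) (h : (none : Option String) ∈ xs) :
    (xs.erase (none : Option String)).filter Option.isSome = xs.filter Option.isSome := by
  induction xs with
  | nil => simp at h
  | cons x xs ih =>
    by_cases hx : x = (none : Option String)
    · subst hx; simp [List.erase_cons_head]
    · rw [List.erase_cons_tail (by simpa using hx)]
      have hmem : (none : Option String) ∈ xs := by
        rcases List.mem_cons.mp h with h' | h'
        · exact absurd h'.symm hx
        · exact h'
      simp only [List.filter_cons]
      rw [ih hmem]

theorem termediumRemZeros_eq_filter (xs : List (Option String)) :
    termediumRemZeros xs = xs.filter Option.isSome := by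
  rw [termediumRemZeros]
  split
  · rename_i h
    rw [termediumRemZeros_eq_filter]
    rw [PySem.List.remove?_eq_some_erase _ _ h]
    simpa using filter_isSome_erase_none xs h
  · rename_i h
    rw [List.filter_eq_self.mpr]
    intro x hx
    cases x with
    | none => exact absurd hx h
    | some s => rfl
termination_by xs.length
decreasing_by exact termediumRemove_length_lt _ (by assumption)

-- map-some lists index into HasPair facts
theorem pyGetD_map_some (a : List String) (n : Nat) :
    PySem.List.pyGetD (a.map some) (n : Int) (none : Option String) =
      ((a[n]?).map some).getD none := by
  rw [PySem.List.pyGetD_natCast]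
  simp [List.getD_eq_getElem?_getD]

-- main theorem body
theorem termedium_eq_alt (a : List String) : termedium a = termedium_alt a := by
  by_cases hp : HasPairFrom a 0
  · -- a pair exists: both return 1
    obtain ⟨j, -, h1, h2⟩ := hp
    have hj1 : j < a.length := (List.getElem?_eq_some_iff.mp h1).1
    have hj2 : j + 1 < a.length := (List.getElem?_eq_some_iff.mp h2).1
    have halt : termedium_alt a = 1 := by
      rw [termedium_alt_eq, if_pos]
      exact (termediumAltGo_fst_false a [] 0).mpr ⟨j, Nat.zero_le j, h1, h2⟩
    rw [halt]
    unfold termedium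
    simp only []
    have hmem : (none : Option String) ∈
        termediumLoop (a.map some) (PySem.List.pyRange 0 ((a.map some).length - 1) 1) := by
      apply none_mem_termediumLoop
      · intro k hk
        exact ((PySem.List.mem_pyRange_one).mp hk).1
      refine ⟨(j : Int), ?_, ?_, ?_⟩
      · rw [PySem.List.mem_pyRange_one]
        constructor
        · omega
        · simp only [List.length_map]
          omega
      · rw [pyGetD_map_some, h1]; rfl
      · have : (j : Int) + 1 = ((j + 1 : Nat) : Int) := by push_cast; ring
        rw [this, pyGetD_map_some, h2]; rfl
    rw [termediumRemZeros_eq_filter]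
    have hlen := termediumLoop_length (a.map some)
      (PySem.List.pyRange 0 ((a.map some).length - 1) 1)
    have hlt : ((termediumLoop (a.map some)
        (PySem.List.pyRange 0 ((a.map some).length - 1) 1)).filter Option.isSome).length <
        (termediumLoop (a.map some) (PySem.List.pyRange 0 ((a.map some).length - 1) 1)).length := by
      apply List.length_filter_lt_length_iff_exists.mpr
      exact ⟨none, hmem, by simp⟩
    rw [if_neg]
    intro hEq
    rw [hlen] at hlt
    omega
  · -- no pair: both return 0
    have halt : termedium_alt a = 0 := by
      rw [termedium_alt_eq, if_neg]
      intro hT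
      exact hp ((termediumAltGo_fst_false a [] 0).mp hT)
    rw [halt]
    unfold termedium
    simp only []
    have hloop : termediumLoop (a.map some)
        (PySem.List.pyRange 0 ((a.map some).length - 1) 1) = a.map some := by
      apply termediumLoop_eq_of_none
      intro k hk ⟨hc1, hc2⟩
      have hk0 : 0 ≤ k := ((PySem.List.mem_pyRange_one).mp hk).1
      obtain ⟨hlt, hidx⟩ := pyGetD_some_index (a.map some) k "{" hk0 hc1
      obtain ⟨hlt2, hidx2⟩ := pyGetD_some_index (a.map some) (k + 1) "}" (by omega) hc2
      apply hp
      refine ⟨k.toNat, Nat.zero_le _, ?_, ?_⟩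
      · have := hidx; simpa using this
      · have hcast : (k + 1).toNat = k.toNat + 1 := by omega
        rw [hcast] at hidx2
        simpa using hidx2
    rw [hloop, termediumRemZeros_eq_filter]
    rw [List.filter_eq_self.mpr (by intro x hx; obtain ⟨s, -, rfl⟩ := List.mem_map.mp hx; rfl)]
    simp

-- ===== VERDICT (by name: the statement is the Claim_ definition above) =====
theorem termedium_spec : Claim_equal_termedium := by
  intro a _
  unfold Spec_termedium
  exact termedium_eq_alt a
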